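-- pv_equiv track=rewrite | github.com/marius004/dots-and-boxes-ai | core/board.py | calc_possible_moves
-- ===== SOURCE A (Python) =====
-- def calc_possible_moves(rows, cols):
--     moves = []
--
--     for row in range(0, rows):
--         for col in range(0, cols):
--             if row + 1 < rows:
--                 moves.append(((row, col), (row + 1, col)))
--             if col + 1 < cols:
--                 moves.append(((row, col), (row, col + 1)))
--
--     return list(sorted(moves))
-- ===== SOURCE B (Python) =====
-- def calc_possible_moves(rows, cols):
--     # Per row, build the horizontal-edge list and vertical-edge list by
--     # comprehension and interleave them with zip (H before V per cell),
--     # which is exactly lexicographic order -- no sort, no per-cell branches.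
--     moves = []
--     for row in range(rows):
--         hs = [((row, c), (row, c + 1)) for c in range(cols - 1)]
--         if row + 1 < rows:
--             vs = [((row, c), (row + 1, c)) for c in range(cols)]
--             moves += [e for hv in zip(hs, vs) for e in hv]
--             moves += vs[len(hs):]
--         else:
--             moves += hs
--     return moves
-- ===== Notes on version B (the rewrite author's own statement) =====
-- stated objective: faster
-- what changed: B builds each row's horizontal and vertical edge lists by comprehension and interleaves them with zip (trailing vertical edge appended by a slice), emitting the edges directly in lexicographic order instead of A's per-cell conditional appends followed by a global sort.
import Mathlib
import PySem

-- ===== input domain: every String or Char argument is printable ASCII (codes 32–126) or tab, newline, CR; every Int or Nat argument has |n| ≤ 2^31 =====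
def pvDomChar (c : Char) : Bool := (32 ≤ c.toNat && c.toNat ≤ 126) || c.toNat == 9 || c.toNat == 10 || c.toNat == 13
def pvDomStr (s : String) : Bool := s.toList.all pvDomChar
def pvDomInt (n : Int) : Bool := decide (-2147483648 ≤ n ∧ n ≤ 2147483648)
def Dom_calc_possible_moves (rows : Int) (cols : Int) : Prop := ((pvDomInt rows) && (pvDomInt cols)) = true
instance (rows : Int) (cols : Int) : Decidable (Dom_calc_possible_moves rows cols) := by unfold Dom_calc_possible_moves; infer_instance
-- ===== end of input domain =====

-- B builds each row's horizontal and vertical edge lists by comprehension and interleaves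
-- them with zip, emitting lexicographic order directly and dropping A's global sort.

-- ===== PORT A =====
-- Python's `sorted(moves)` compares the nested int tuples lexicographically; we sort by
-- the base-2^32 encoding of the four coordinates, which realises exactly that order here
-- because every coordinate is a cell index in [0, 2^31], well below 2^32 (Dom bound).
def pvKey (e : (Int × Int) × (Int × Int)) : Int :=
  ((e.1.1 * 4294967296 + e.1.2) * 4294967296 + e.2.1) * 4294967296 + e.2.2

def calc_possible_moves (rows : Int) (cols : Int) : List ((Int × Int) × (Int × Int)) :=
  let moves : List ((Int × Int) × (Int × Int)) :=
    (PySem.List.pyRange 0 rows 1).foldl (fun acc row =>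
      (PySem.List.pyRange 0 cols 1).foldl (fun acc col =>
        let acc := if row + 1 < rows then acc ++ [((row, col), (row + 1, col))] else acc
        if col + 1 < cols then acc ++ [((row, col), (row, col + 1))] else acc) acc) []
  PySem.List.sorted moves pvKey

-- ===== PORT B =====
def calc_possible_moves_alt (rows : Int) (cols : Int) : List ((Int × Int) × (Int × Int)) :=
  (PySem.List.pyRange 0 rows 1).foldl (fun moves row =>
    let hs := (PySem.List.pyRange 0 (cols - 1) 1).map (fun c => ((row, c), (row, c + 1)))
    if row + 1 < rows then
      let vs := (PySem.List.pyRange 0 cols 1).map (fun c => ((row, c), (row + 1, c)))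
      (moves ++ (hs.zip vs).flatMap (fun hv => [hv.1, hv.2]))
        ++ PySem.List.slice vs (some (hs.length : Int)) none   -- vs[len(hs):]
    else
      moves ++ hs) []

-- ===== PRECONDITION & SPEC =====
def Spec_calc_possible_moves (rows : Int) (cols : Int) (out : List ((Int × Int) × (Int × Int))) : Prop := out = calc_possible_moves_alt rows cols
instance (rows : Int) (cols : Int) (out : List ((Int × Int) × (Int × Int))) : Decidable (Spec_calc_possible_moves rows cols out) := by unfold Spec_calc_possible_moves; infer_instance

-- ===== CLAIM =====
def Claim_equal_calc_possible_moves : Prop := ∀ (rows : Int) (cols : Int), Dom_calc_possible_moves rows cols → Spec_calc_possible_moves rows cols (calc_possible_moves rows cols)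

-- ===== LEMMAS AND PROOFS =====

-- per-cell chunks: A's emission order (vertical, then horizontal) and sorted order (H, then V)
def pvCellA (rows cols r c : Int) : List ((Int × Int) × (Int × Int)) :=
  (if r + 1 < rows then [((r, c), (r + 1, c))] else []) ++
  (if c + 1 < cols then [((r, c), (r, c + 1))] else [])

def pvCellB (rows cols r c : Int) : List ((Int × Int) × (Int × Int)) :=
  (if c + 1 < cols then [((r, c), (r, c + 1))] else []) ++
  (if r + 1 < rows then [((r, c), (r + 1, c))] else [])

theorem pv_foldl_append {α β : Type} (l : List α) (g : List β → α → List β) (f : α → List β)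
    (h : ∀ acc x, g acc x = acc ++ f x) (init : List β) :
    l.foldl g init = init ++ l.flatMap f := by
  induction l generalizing init with
  | nil => simp
  | cons x t ih => simp [h, ih, List.append_assoc]

theorem pv_movesA_eq (rows cols : Int) :
    ((PySem.List.pyRange 0 rows 1).foldl (fun acc row =>
      (PySem.List.pyRange 0 cols 1).foldl (fun acc col =>
        let acc := if row + 1 < rows then acc ++ [((row, col), (row + 1, col))] else acc
        if col + 1 < cols then acc ++ [((row, col), (row, col + 1))] else acc) acc) []
      : List ((Int × Int) × (Int × Int)))
    = (PySem.List.pyRange 0 rows 1).flatMap (fun r =>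
        (PySem.List.pyRange 0 cols 1).flatMap (pvCellA rows cols r)) := by
  have := pv_foldl_append (PySem.List.pyRange 0 rows 1)
    (fun acc row => (PySem.List.pyRange 0 cols 1).foldl (fun acc col =>
        let acc := if row + 1 < rows then acc ++ [((row, col), (row + 1, col))] else acc
        if col + 1 < cols then acc ++ [((row, col), (row, col + 1))] else acc) acc)
    (fun r => (PySem.List.pyRange 0 cols 1).flatMap (pvCellA rows cols r))
    (fun acc r => pv_foldl_append (PySem.List.pyRange 0 cols 1) _ (pvCellA rows cols r)
      (fun acc c => by simp only [pvCellA]; split_ifs <;> simp) acc) []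
  simpa using this

-- the zip-interleave of H over [a,b) with V over [a,b+1), plus V's tail, is the
-- per-cell flatMap [H?]++[V] over [a,b+1)
theorem pv_interleave (H V : Int → (Int × Int) × (Int × Int)) :
    ∀ (k : Nat) (a b : Int), (b - a).toNat = k →
    ((((PySem.List.pyRange a b 1).map H).zip ((PySem.List.pyRange a (b + 1) 1).map V)).flatMap
        (fun hv => [hv.1, hv.2]))
      ++ ((PySem.List.pyRange a (b + 1) 1).map V).drop ((PySem.List.pyRange a b 1).map H).length
    = (PySem.List.pyRange a (b + 1) 1).flatMap
        (fun c => (if c < b then [H c] else []) ++ [V c]) := by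
  intro k
  induction k with
  | zero =>
    intro a b hk
    have hba : b ≤ a := by omega
    rw [PySem.List.pyRange_one_eq_nil hba]
    by_cases hb : b + 1 ≤ a
    · rw [PySem.List.pyRange_one_eq_nil hb]; simp
    · have : b = a := by omega
      subst this
      rw [PySem.List.pyRange_one_singleton]
      simp
  | succ n ih =>
    intro a b hk
    have hab : a < b := by omega
    rw [PySem.List.pyRange_one_cons hab, PySem.List.pyRange_one_cons (by omega : a < b + 1)]
    simp only [List.map_cons, List.zip_cons_cons, List.flatMap_cons, List.length_cons,
      List.drop_succ_cons]
    rw [List.append_assoc]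
    rw [ih (a + 1) b (by omega)]
    simp [hab]

-- the last row (no vertical edges): hs alone is the per-cell flatMap
theorem pv_lastrow (H : Int → (Int × Int) × (Int × Int)) :
    ∀ (k : Nat) (a b : Int), (b - a).toNat = k →
    (PySem.List.pyRange a b 1).map H
    = (PySem.List.pyRange a (b + 1) 1).flatMap (fun c => if c < b then [H c] else []) := by
  intro k
  induction k with
  | zero =>
    intro a b hk
    have hba : b ≤ a := by omega
    rw [PySem.List.pyRange_one_eq_nil hba]
    by_cases hb : b + 1 ≤ a
    · rw [PySem.List.pyRange_one_eq_nil hb]; simp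
    · have : b = a := by omega
      subst this
      rw [PySem.List.pyRange_one_singleton]
      simp
  | succ n ih =>
    intro a b hk
    have hab : a < b := by omega
    rw [PySem.List.pyRange_one_cons hab, PySem.List.pyRange_one_cons (by omega : a < b + 1)]
    simp only [List.map_cons, List.flatMap_cons, hab, if_pos]
    rw [ih (a + 1) b (by omega)]
    simp

theorem pv_movesB_eq (rows cols : Int) :
    calc_possible_moves_alt rows cols
    = (PySem.List.pyRange 0 rows 1).flatMap (fun r =>
        (PySem.List.pyRange 0 cols 1).flatMap (pvCellB rows cols r)) := by
  unfold calc_possible_moves_alt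
  refine pv_foldl_append _ _ _ (fun acc r => ?_) []
  simp only
  have hcols : cols - 1 + 1 = cols := by ring
  by_cases hr : r + 1 < rows
  · rw [if_pos hr, PySem.List.slice_from_natCast, List.append_assoc]
    congr 1
    have := pv_interleave (fun c => ((r, c), (r, c + 1))) (fun c => ((r, c), (r + 1, c)))
      (cols - 1 - 0).toNat 0 (cols - 1) rfl
    rw [hcols] at this
    rw [this]
    refine List.flatMap_congr (fun c _ => ?_)
    have hiff : c < cols - 1 ↔ c + 1 < cols := by omega
    simp [pvCellB, hr, hiff]
  · rw [if_neg hr]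
    congr 1
    have := pv_lastrow (fun c => ((r, c), (r, c + 1))) (cols - 1 - 0).toNat 0 (cols - 1) rfl
    rw [hcols] at this
    rw [this]
    refine List.flatMap_congr (fun c _ => ?_)
    have hiff : c < cols - 1 ↔ c + 1 < cols := by omega
    simp [pvCellB, hr, hiff]

theorem pv_flatMap_perm {α β : Type} (l : List α) (f g : α → List β)
    (h : ∀ x ∈ l, (f x).Perm (g x)) : (l.flatMap f).Perm (l.flatMap g) := by
  induction l with
  | nil => simp
  | cons x t ih =>
    simp only [List.flatMap_cons]
    exact (h x (by simp)).append (ih (fun y hy => h y (by simp [hy])))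

theorem pv_cell_perm (rows cols r c : Int) : (pvCellB rows cols r c).Perm (pvCellA rows cols r c) := by
  simp only [pvCellA, pvCellB]
  exact List.perm_append_comm

theorem pv_mem_cellB {rows cols r c : Int} {e : (Int × Int) × (Int × Int)}
    (he : e ∈ pvCellB rows cols r c) :
    (c + 1 < cols ∧ e = ((r, c), (r, c + 1))) ∨ (r + 1 < rows ∧ e = ((r, c), (r + 1, c))) := by
  simp only [pvCellB, List.mem_append] at he
  rcases he with h | h <;> [left; right] <;>
    (split_ifs at h with hc <;> simp at h <;> exact ⟨by assumption, h⟩)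

theorem pv_pairwiseB (rows cols : Int) (hc : cols ≤ 2147483648) :
    List.Pairwise (fun a b => pvKey a < pvKey b)
      ((PySem.List.pyRange 0 rows 1).flatMap (fun r =>
        (PySem.List.pyRange 0 cols 1).flatMap (pvCellB rows cols r))) := by
  rw [List.pairwise_flatMap]
  constructor
  · intro r hrmem
    rw [List.pairwise_flatMap]
    constructor
    · intro c _
      simp only [pvCellB]
      split_ifs <;> simp [pvKey] <;> omega
    · have hp := PySem.List.pairwise_lt_pyRange_one 0 cols
      refine hp.imp_of_mem ?_
      intro c c' hcm hcm' hlt x hx y hy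
      rw [PySem.List.mem_pyRange_one] at hrmem hcm hcm'
      rcases pv_mem_cellB hx with ⟨h1, rfl⟩ | ⟨h1, rfl⟩ <;>
        rcases pv_mem_cellB hy with ⟨h2, rfl⟩ | ⟨h2, rfl⟩ <;>
        simp only [pvKey] <;> omega
  · have hp := PySem.List.pairwise_lt_pyRange_one 0 rows
    refine hp.imp_of_mem ?_
    intro r r' hrm hrm' hlt x hx y hy
    simp only [List.mem_flatMap] at hx hy
    obtain ⟨c, hcm, hx⟩ := hx
    obtain ⟨c', hcm', hy⟩ := hy
    rw [PySem.List.mem_pyRange_one] at hrm hrm' hcm hcm'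
    rcases pv_mem_cellB hx with ⟨h1, rfl⟩ | ⟨h1, rfl⟩ <;>
      rcases pv_mem_cellB hy with ⟨h2, rfl⟩ | ⟨h2, rfl⟩ <;>
      simp only [pvKey] <;> omega

-- ===== VERDICT =====
theorem calc_possible_moves_spec : Claim_equal_calc_possible_moves := by
  intro rows cols hdom
  unfold Dom_calc_possible_moves pvDomInt at hdom
  simp only [Bool.and_eq_true, decide_eq_true_eq] at hdom
  unfold Spec_calc_possible_moves calc_possible_moves
  rw [pv_movesA_eq, pv_movesB_eq]
  exact PySem.List.sorted_eq_of_perm_of_pairwise_lt _ _ pvKey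
    (pv_flatMap_perm _ _ _ (fun r _ => pv_flatMap_perm _ _ _ (fun c _ => pv_cell_perm rows cols r c)))
    (pv_pairwiseB rows cols hdom.2.2)
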